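-- pv_equiv track=rewrite | github.com/Brobin/project-euler | src/problem_081.py | upper_triangle
-- ===== SOURCE A (Python) =====
-- def upper_triangle(matrix):
--     triangle = []
--     for i in range(len(matrix)):
--         row = []
--         for j in range(i + 1):
--             row.append(matrix[i - j][j])
--         triangle.append(row)
--     return triangle
-- ===== SOURCE B (Python) =====
-- def upper_triangle(matrix):
--     n = len(matrix)
--     triangle = [[] for _ in range(n)]
--     for c in range(n):
--         for r in range(n - c):
--             triangle[r + c].append(matrix[r][c])
--     return triangle
-- ===== Notes on version B (the rewrite author's own statement) =====
-- stated objective: alternative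
-- what changed: B pre-allocates the n anti-diagonal buckets and scatters each source element matrix[r][c] into bucket r+c in a single column-major sweep, instead of A's per-row gather that re-walks one anti-diagonal per output row.
import Mathlib
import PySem

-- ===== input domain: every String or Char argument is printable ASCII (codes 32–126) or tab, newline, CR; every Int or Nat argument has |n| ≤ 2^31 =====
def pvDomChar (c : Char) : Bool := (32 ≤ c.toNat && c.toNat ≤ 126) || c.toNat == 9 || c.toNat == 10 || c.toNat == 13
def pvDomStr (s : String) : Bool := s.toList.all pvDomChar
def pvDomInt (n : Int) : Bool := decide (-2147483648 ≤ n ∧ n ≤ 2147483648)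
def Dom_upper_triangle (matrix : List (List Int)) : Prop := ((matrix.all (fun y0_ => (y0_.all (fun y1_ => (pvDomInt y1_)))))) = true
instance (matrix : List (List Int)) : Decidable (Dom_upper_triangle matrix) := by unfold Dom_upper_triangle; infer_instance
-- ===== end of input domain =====

-- B scatters each element into its anti-diagonal bucket in one column-major sweep instead of
-- A's per-row gather; alternative decomposition, same cost. Equivalence is over the return value.

-- ===== PORT A =====
def upper_triangle (matrix : List (List Int)) : List (List Int) :=
  -- triangle = []; for i in range(len(matrix)): row = []; for j in range(i+1):
  --   row.append(matrix[i-j][j]); triangle.append(row)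
  (PySem.List.pyRange 0 matrix.length 1).foldl
    (fun triangle i =>
      triangle ++
        [(PySem.List.pyRange 0 (i + 1) 1).foldl
          (fun row j =>
            row ++ [PySem.List.pyGetD (PySem.List.pyGetD matrix (i - j) []) j 0]) []])
    []

-- ===== PORT B =====
def upper_triangle_alt (matrix : List (List Int)) : List (List Int) :=
  -- n = len(matrix); triangle = [[] for _ in range(n)]
  -- for c in range(n): for r in range(n-c): triangle[r+c].append(matrix[r][c])
  (PySem.List.pyRange 0 (matrix.length : Int) 1).foldl
    (fun t c =>
      (PySem.List.pyRange 0 ((matrix.length : Int) - c) 1).foldl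
        (fun t r =>
          PySem.List.pySetD t (r + c)
            (PySem.List.pyGetD t (r + c) [] ++
              [PySem.List.pyGetD (PySem.List.pyGetD matrix r []) c 0]))
        t)
    ((PySem.List.pyRange 0 (matrix.length : Int) 1).map (fun _ => ([] : List Int)))

-- ===== PRECONDITION & SPEC =====
-- Pre_ excludes exactly the jagged inputs where row i is shorter than n - i, on which the
-- Python (both A and B) raises IndexError; inside Pre_ both return normally.
def Pre_upper_triangle (matrix : List (List Int)) : Prop :=
  ∀ i, i < matrix.length → matrix.length ≤ (matrix.getD i []).length + i
instance (matrix : List (List Int)) : Decidable (Pre_upper_triangle matrix) := by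
  unfold Pre_upper_triangle; infer_instance
def pvWitness_upper_triangle : List (List Int) := [[1, 2], [3]]

def Spec_upper_triangle (matrix : List (List Int)) (out : List (List Int)) : Prop := out = upper_triangle_alt matrix
instance (matrix : List (List Int)) (out : List (List Int)) : Decidable (Spec_upper_triangle matrix out) := by unfold Spec_upper_triangle; infer_instance

-- ===== CLAIM (what is proved, stated in full; the proofs are below) =====
def Claim_equal_upper_triangle : Prop := ∀ (matrix : List (List Int)), Dom_upper_triangle matrix → Pre_upper_triangle matrix → Spec_upper_triangle matrix (upper_triangle matrix)

-- ===== LEMMAS AND PROOFS =====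

-- g matrix a b = matrix[a][b] with defaults, Nat indices
def pvG (matrix : List (List Int)) (a b : Nat) : Int :=
  (matrix.getD a []).getD b 0

theorem pv_foldl_append_singleton {α β : Type} (f : α → β) (l : List α) (acc : List β) :
    l.foldl (fun r x => r ++ [f x]) acc = acc ++ l.map f := by
  induction l generalizing acc with
  | nil => simp
  | cons x xs ih => simp [List.foldl, ih, List.append_assoc]

-- A's result in closed form
theorem pv_portA_eq (matrix : List (List Int)) :
    upper_triangle matrix =
      (List.range matrix.length).map (fun i =>
        (List.range (i + 1)).map (fun j => pvG matrix (i - j) j)) := by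
  unfold upper_triangle
  rw [PySem.List.pyRange_one 0 matrix.length]
  simp only [Int.sub_zero, Int.toNat_natCast, zero_add]
  rw [List.foldl_map, pv_foldl_append_singleton
    (fun (k : Nat) =>
      (PySem.List.pyRange 0 ((k : Int) + 1) 1).foldl
        (fun row j => row ++ [PySem.List.pyGetD (PySem.List.pyGetD matrix ((k : Int) - j) []) j 0]) [])]
  simp only [List.nil_append]
  refine List.map_congr_left (fun i hi => ?_)
  rw [PySem.List.pyRange_one 0 ((i : Int) + 1)]
  have h1 : (((i : Int) + 1 - 0).toNat) = i + 1 := by omega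
  rw [h1, List.foldl_map, pv_foldl_append_singleton
    (fun (j : Nat) => PySem.List.pyGetD (PySem.List.pyGetD matrix ((i : Int) - (0 + (j : Int))) []) (0 + (j : Int)) 0)]
  simp only [List.nil_append]
  refine List.map_congr_left (fun j hj => ?_)
  have hji : j ≤ i := by simpa [Nat.lt_succ_iff] using (List.mem_range.mp hj)
  have h2 : (i : Int) - (0 + (j : Int)) = ((i - j : Nat) : Int) := by omega
  rw [h2]
  simp [pvG, PySem.List.pyGetD_natCast]

-- one inner pass of B (column c), in Nat form, as a pointwise description
theorem pv_inner (matrix : List (List Int)) (c : Nat) (k : Nat) (t : List (List Int))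
    (hlen : c + k ≤ t.length) :
    ((List.range k).foldl
        (fun t r => t.set (r + c) (t.getD (r + c) [] ++ [pvG matrix r c])) t).length = t.length ∧
    ∀ d, ((List.range k).foldl
        (fun t r => t.set (r + c) (t.getD (r + c) [] ++ [pvG matrix r c])) t).getD d [] =
      if c ≤ d ∧ d < c + k then t.getD d [] ++ [pvG matrix (d - c) c] else t.getD d [] := by
  induction k with
  | zero => simp
  | succ k ih =>
    have hk : c + k ≤ t.length := by omega
    obtain ⟨ihlen, ihget⟩ := ih hk
    rw [List.range_succ, List.foldl_append]
    set u := (List.range k).foldl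
        (fun t r => t.set (r + c) (t.getD (r + c) [] ++ [pvG matrix r c])) t with hu
    simp only [List.foldl_cons, List.foldl_nil]
    constructor
    · simp [ihlen]
    · intro d
      rw [List.getD_eq_getElem?_getD, List.getElem?_set]
      by_cases hd : d = k + c
      · have hdlt : k + c < u.length := by omega
        simp only [hd, if_pos hdlt]
        rw [ihget (k + c)]
        have : ¬ (c ≤ k + c ∧ k + c < c + k) := by omega
        rw [if_neg this]
        have : c ≤ k + c ∧ k + c < c + (k + 1) := by omega
        rw [if_pos this]
        have hkc : k + c - c = k := by omega
        rw [hkc]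
        simp [List.getD_eq_getElem?_getD]
      · rw [if_neg (fun h => hd h.symm)]
        rw [← List.getD_eq_getElem?_getD, ihget d]
        have heq : (c ≤ d ∧ d < c + k) ↔ (c ≤ d ∧ d < c + (k + 1)) := by omega
        by_cases hc : c ≤ d ∧ d < c + k
        · rw [if_pos hc, if_pos (by omega)]
        · rw [if_neg hc, if_neg (by omega)]

-- B's nat-level scatter loop
def pvOuter (matrix : List (List Int)) (n c : Nat) : List (List Int) :=
  (List.range c).foldl
    (fun t c => (List.range (n - c)).foldl
      (fun t r => t.set (r + c) (t.getD (r + c) [] ++ [pvG matrix r c])) t)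
    ((List.range n).map (fun _ => ([] : List Int)))

theorem pv_outer_inv (matrix : List (List Int)) (n c : Nat) (hc : c ≤ n) :
    (pvOuter matrix n c).length = n ∧
    ∀ d, d < n → (pvOuter matrix n c).getD d [] =
      (List.range (min c (d + 1))).map (fun j => pvG matrix (d - j) j) := by
  induction c with
  | zero => simp [pvOuter]
  | succ c ih =>
    obtain ⟨ihlen, ihget⟩ := ih (by omega)
    have hstep : pvOuter matrix n (c + 1) =
        (List.range (n - c)).foldl
          (fun t r => t.set (r + c) (t.getD (r + c) [] ++ [pvG matrix r c]))
          (pvOuter matrix n c) := by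
      unfold pvOuter
      rw [List.range_succ, List.foldl_append, List.foldl_cons, List.foldl_nil]
    obtain ⟨plen, pget⟩ := pv_inner matrix c (n - c) (pvOuter matrix n c) (by omega)
    rw [hstep]
    refine ⟨by rw [plen, ihlen], fun d hd => ?_⟩
    rw [pget d]
    by_cases hcd : c ≤ d
    · rw [if_pos (by omega), ihget d hd]
      have h5 : min c (d + 1) = c := by omega
      have h6 : min (c + 1) (d + 1) = c + 1 := by omega
      rw [h5, h6, List.range_succ, List.map_append]
      simp
    · rw [if_neg (by omega), ihget d hd]
      have h7 : min c (d + 1) = d + 1 := by omega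
      have h8 : min (c + 1) (d + 1) = d + 1 := by omega
      rw [h7, h8]

-- B's result in closed form
theorem pv_portB_eq (matrix : List (List Int)) :
    upper_triangle_alt matrix =
      (List.range matrix.length).map (fun d =>
        (List.range (d + 1)).map (fun j => pvG matrix (d - j) j)) := by
  unfold upper_triangle_alt
  set n := matrix.length with hn
  rw [PySem.List.pyRange_one 0 (n : Int)]
  simp only [Int.sub_zero, Int.toNat_natCast, zero_add, List.map_map,
    Function.comp_def, List.foldl_map]
  have hstep : ∀ (c : Nat) (t : List (List Int)),
      (PySem.List.pyRange 0 ((n : Int) - (c : Int)) 1).foldl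
        (fun t r =>
          PySem.List.pySetD t (r + (c : Int))
            (PySem.List.pyGetD t (r + (c : Int)) [] ++
              [PySem.List.pyGetD (PySem.List.pyGetD matrix r []) ((c : Nat) : Int) 0]))
        t =
      (List.range (n - c)).foldl
        (fun t r => t.set (r + c) (t.getD (r + c) [] ++ [pvG matrix r c])) t := by
    intro c t
    rw [PySem.List.pyRange_one 0 ((n : Int) - (c : Int))]
    have h3 : (((n : Int) - (c : Int) - 0).toNat) = n - c := by omega
    rw [h3, List.foldl_map]
    apply PySem.List.foldl_congr_mem
    intro t' r hr
    have h4 : (0 : Int) + (r : Nat) + (c : Int) = ((r + c : Nat) : Int) := by omega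
    have h5 : (0 : Int) + (r : Nat) = ((r : Nat) : Int) := by omega
    rw [h4, h5, PySem.List.pySetD_natCast, PySem.List.pyGetD_natCast,
      PySem.List.pyGetD_natCast, PySem.List.pyGetD_natCast]
    rfl
  rw [List.foldl_ext _
    (fun t c => (List.range (n - c)).foldl
      (fun t r => t.set (r + c) (t.getD (r + c) [] ++ [pvG matrix r c])) t)
    _ (fun t c _ => hstep c t)]
  obtain ⟨hlen, hget⟩ := pv_outer_inv matrix n n le_rfl
  apply List.ext_getElem
  · simpa [pvOuter] using hlen
  · intro d h1 h2
    have hd : d < n := by simpa using h2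
    have hg := hget d hd
    have hlen' : d < (pvOuter matrix n n).length := by omega
    rw [List.getD_eq_getElem?_getD, List.getElem?_eq_getElem hlen', Option.getD_some] at hg
    have hmin : min n (d + 1) = d + 1 := by omega
    rw [hmin] at hg
    calc _ = (pvOuter matrix n n)[d] := rfl
    _ = _ := by rw [hg]; simp

-- ===== VERDICT (by name: the statement is the Claim_ definition above) =====
theorem upper_triangle_spec : Claim_equal_upper_triangle := by
  intro matrix _ _
  unfold Spec_upper_triangle
  rw [pv_portA_eq, pv_portB_eq]
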